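-- pv_equiv track=rewrite | github.com/algaebrown/resistanceExp | Genome/goldstandard_pair/make_gold_file.py | link_or_not
-- ===== SOURCE A (Python) =====
-- def link_or_not(go_set1, go_set2, large_term_to_remove = None):
--     ''' decide if there is term overlapping'''
--
--     inter = go_set1.intersection(go_set2)
--     if len(large_term_to_remove) > 0:
--         [inter.remove(term) for term in large_term_to_remove if term in inter]
--
--     if len(inter) > 0:
--         answer = 1
--     else:
--         answer = 0
--
--
--     return(answer)
-- ===== SOURCE B (Python) =====
-- def link_or_not(go_set1, go_set2, large_term_to_remove=None):
--     ''' decide if there is term overlapping'''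
--     xs = sorted(go_set1)
--     ys = sorted(go_set2)
--     i = j = 0
--     while i < len(xs) and j < len(ys):
--         if xs[i] < ys[j]:
--             i += 1
--         elif ys[j] < xs[i]:
--             j += 1
--         elif xs[i] in large_term_to_remove:
--             i += 1
--             j += 1
--         else:
--             return 1
--     return 0
-- ===== Notes on version B (the rewrite author's own statement) =====
-- stated objective: alternative
-- what changed: Instead of materializing the hash-set intersection and mutating it by removing excluded terms, B sorts both sets and walks them with a two-pointer merge, returning 1 at the first common element not in the removal list.
import Mathlib
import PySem

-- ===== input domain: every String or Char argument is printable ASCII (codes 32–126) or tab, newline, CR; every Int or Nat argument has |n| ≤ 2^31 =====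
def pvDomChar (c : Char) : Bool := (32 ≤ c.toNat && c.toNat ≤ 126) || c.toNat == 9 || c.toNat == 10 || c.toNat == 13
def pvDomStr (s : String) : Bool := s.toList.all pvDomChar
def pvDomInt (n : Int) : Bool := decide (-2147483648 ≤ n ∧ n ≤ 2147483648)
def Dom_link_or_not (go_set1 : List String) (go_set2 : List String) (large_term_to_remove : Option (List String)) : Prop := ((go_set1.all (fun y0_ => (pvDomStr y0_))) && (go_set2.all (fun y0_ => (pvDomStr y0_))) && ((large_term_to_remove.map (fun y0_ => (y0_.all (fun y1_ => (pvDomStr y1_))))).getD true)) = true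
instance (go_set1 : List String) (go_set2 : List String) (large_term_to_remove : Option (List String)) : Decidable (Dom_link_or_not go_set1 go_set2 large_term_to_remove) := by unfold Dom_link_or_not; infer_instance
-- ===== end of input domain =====

-- B replaces A's build-intersection-then-remove-then-measure with sorting both sets and a
-- two-pointer merge that stops at the first common element outside the removal list (objective: alternative).
-- ===== PORT A =====
def link_or_not (go_set1 : List String) (go_set2 : List String) (large_term_to_remove : Option (List String)) : Int :=
  match large_term_to_remove with
  | none => 0  -- Python: len(None) raises TypeError; excluded by Pre_
  | some l =>
    let inter := PySem.Set.inter go_set1 go_set2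
    let inter :=
      if (l.length : Int) > 0 then
        l.foldl (fun s term =>
          if PySem.Set.contains s term then ((PySem.Set.remove? s term).getD s) else s) inter
      else inter
    if PySem.Set.len inter > 0 then 1 else 0

-- ===== PORT B =====
-- the while loop of Source B: two pointers over the sorted lists, transcribed as recursion on the suffixes
def pvMergeScan (l : List String) : List String → List String → Int
  | [], _ => 0
  | _ :: _, [] => 0
  | x :: xs, y :: ys =>
    if x < y then pvMergeScan l xs (y :: ys)
    else if y < x then pvMergeScan l (x :: xs) ys
    else if l.contains x then pvMergeScan l xs ys
    else 1
termination_by xs ys => xs.length + ys.length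

def link_or_not_alt (go_set1 : List String) (go_set2 : List String) (large_term_to_remove : Option (List String)) : Int :=
  match large_term_to_remove with
  | none => 0  -- Python: `x in None` raises TypeError on the first common element; excluded by Pre_
  | some l =>
    pvMergeScan l (PySem.List.sorted go_set1 (fun x => x) false)
                 (PySem.List.sorted go_set2 (fun x => x) false)

-- ===== PRECONDITION & SPEC =====
-- Pre_ excludes exactly large_term_to_remove = None, where Python A raises TypeError (len(None)).
def Pre_link_or_not (go_set1 : List String) (go_set2 : List String) (large_term_to_remove : Option (List String)) : Prop := large_term_to_remove.isSome = true
instance (go_set1 : List String) (go_set2 : List String) (large_term_to_remove : Option (List String)) : Decidable (Pre_link_or_not go_set1 go_set2 large_term_to_remove) := by unfold Pre_link_or_not; infer_instance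
def pvWitness_link_or_not : List String × List String × Option (List String) := (["a", "b"], ["b", "c"], some ["x"])
def Spec_link_or_not (go_set1 : List String) (go_set2 : List String) (large_term_to_remove : Option (List String)) (out : Int) : Prop := out = link_or_not_alt go_set1 go_set2 large_term_to_remove
instance (go_set1 : List String) (go_set2 : List String) (large_term_to_remove : Option (List String)) (out : Int) : Decidable (Spec_link_or_not go_set1 go_set2 large_term_to_remove out) := by unfold Spec_link_or_not; infer_instance

-- ===== CLAIM (what is proved, stated in full; the proofs are below) =====
def Claim_equal_link_or_not : Prop := ∀ (go_set1 : List String) (go_set2 : List String) (large_term_to_remove : Option (List String)), Dom_link_or_not go_set1 go_set2 large_term_to_remove → Pre_link_or_not go_set1 go_set2 large_term_to_remove → Spec_link_or_not go_set1 go_set2 large_term_to_remove (link_or_not go_set1 go_set2 large_term_to_remove)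

-- ===== LEMMAS AND PROOFS =====

-- A's guarded remove-loop over l is a single filter dropping every element of l.
theorem foldl_remove_eq_filter (l : List String) (s : List String) :
    l.foldl (fun s term =>
      if PySem.Set.contains s term then ((PySem.Set.remove? s term).getD s) else s) s
      = s.filter (fun x => !l.contains x) := by
  induction l generalizing s with
  | nil => simp
  | cons t ts ih =>
    have hstep : (if PySem.Set.contains s t then ((PySem.Set.remove? s t).getD s) else s)
        = s.filter (fun y => !y == t) := by
      by_cases h : PySem.Set.contains s t
      · have h' : t ∈ s := by simpa [PySem.Set.contains] using h
        simp [PySem.Set.remove?, PySem.Set.discard, h']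
      · have h' : t ∉ s := by simpa [PySem.Set.contains] using h
        rw [if_neg h]
        symm
        rw [List.filter_eq_self]
        intro y hy
        have hne : y ≠ t := fun hyt => h' (hyt ▸ hy)
        simp [hne]
    rw [List.foldl_cons, hstep, ih, List.filter_filter]
    apply List.filter_congr
    intro x _
    by_cases hxt : x = t
    · simp [hxt]
    · simp [hxt]

-- A returns 1 exactly when some element lies in both sets and outside l.
theorem link_or_not_some_eq (s1 s2 l : List String) :
    link_or_not s1 s2 (some l)
      = if ∃ x ∈ s1, x ∈ s2 ∧ x ∉ l then 1 else 0 := by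
  unfold link_or_not
  simp only
  have hfilter :
      (if ((l.length : Int) > 0) then
        l.foldl (fun s term =>
          if PySem.Set.contains s term then ((PySem.Set.remove? s term).getD s) else s)
          (PySem.Set.inter s1 s2)
      else PySem.Set.inter s1 s2)
      = (PySem.Set.inter s1 s2).filter (fun x => !l.contains x) := by
    cases l with
    | nil => simp
    | cons a as =>
      rw [if_pos (by exact_mod_cast Nat.succ_pos as.length), foldl_remove_eq_filter]
  rw [hfilter]
  have hiff : (PySem.Set.len ((PySem.Set.inter s1 s2).filter (fun x => !l.contains x)) > 0)
      ↔ (∃ x ∈ s1, x ∈ s2 ∧ x ∉ l) := by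
    simp only [PySem.Set.len, PySem.Set.inter, List.filter_filter, gt_iff_lt,
      Int.natCast_pos, List.length_pos_iff, ne_eq, List.filter_eq_nil_iff,
      Bool.and_eq_true, PySem.Set.contains, List.contains_eq_mem,
      decide_eq_true_eq, Bool.not_eq_eq_eq_not, Bool.not_true, decide_eq_false_iff_not,
      not_forall]
    constructor
    · rintro ⟨x, hx1, h⟩
      exact ⟨x, hx1, by tauto⟩
    · rintro ⟨x, hx1, hx2, hxl⟩
      exact ⟨x, hx1, by tauto⟩
  by_cases hc : ∃ x ∈ s1, x ∈ s2 ∧ x ∉ l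
  · rw [if_pos (by exact_mod_cast hiff.mpr hc), if_pos hc]
  · rw [if_neg (fun h => hc (hiff.mp h)), if_neg hc]

-- The merge scan over two ≤-sorted lists decides the same existential.
theorem pvMergeScan_eq (l : List String) :
    ∀ (xs ys : List String), xs.Pairwise (· ≤ ·) → ys.Pairwise (· ≤ ·) →
      pvMergeScan l xs ys = if ∃ x ∈ xs, x ∈ ys ∧ x ∉ l then 1 else 0 := by
  intro xs
  induction xs with
  | nil => intro ys _ _; simp [pvMergeScan]
  | cons x xs ihx =>
    intro ys hxs hys
    induction ys with
    | nil => simp [pvMergeScan]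
    | cons y ys ihy =>
      rw [pvMergeScan]
      by_cases hxy : x < y
      · rw [if_pos hxy]
        rw [ihx (y :: ys) (List.Pairwise.sublist (List.sublist_cons_self x xs) hxs) hys]
        congr 1
        apply propext
        have hxnot : x ∉ y :: ys := by
          intro hmem
          have hle : y ≤ x := by
            rcases List.mem_cons.mp hmem with h | h
            · exact le_of_eq h.symm
            · exact (List.pairwise_cons.mp hys).1 x h
          exact absurd hxy (not_lt.mpr hle)
        constructor
        · rintro ⟨z, hz, hrest⟩; exact ⟨z, List.mem_cons_of_mem x hz, hrest⟩
        · rintro ⟨z, hz, hrest⟩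
          rcases List.mem_cons.mp hz with h | h
          · exact absurd (h ▸ hrest.1) hxnot
          · exact ⟨z, h, hrest⟩
      · rw [if_neg hxy]
        by_cases hyx : y < x
        · rw [if_pos hyx]
          rw [ihy (List.Pairwise.sublist (List.sublist_cons_self y ys) hys)]
          congr 1
          apply propext
          have hynot : y ∉ x :: xs := by
            intro hmem
            have hle : x ≤ y := by
              rcases List.mem_cons.mp hmem with h | h
              · exact le_of_eq h.symm
              · exact (List.pairwise_cons.mp hxs).1 y h
            exact absurd hyx (not_lt.mpr hle)
          constructor
          · rintro ⟨z, hz, hz2, hzl⟩; exact ⟨z, hz, List.mem_cons_of_mem y hz2, hzl⟩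
          · rintro ⟨z, hz, hz2, hzl⟩
            rcases List.mem_cons.mp hz2 with h | h
            · exact absurd (h ▸ hz) hynot
            · exact ⟨z, hz, h, hzl⟩
        · rw [if_neg hyx]
          have hxeqy : x = y := le_antisymm (not_lt.mp hyx) (not_lt.mp hxy)
          by_cases hl : l.contains x
          · rw [if_pos hl]
            have hxl : x ∈ l := by simpa using hl
            rw [ihx ys (List.Pairwise.sublist (List.sublist_cons_self x xs) hxs)
                 (List.Pairwise.sublist (List.sublist_cons_self y ys) hys)]
            congr 1
            apply propext
            constructor
            · rintro ⟨z, hz, hz2, hzl⟩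
              exact ⟨z, List.mem_cons_of_mem x hz, List.mem_cons_of_mem y hz2, hzl⟩
            · rintro ⟨z, hz, hz2, hzl⟩
              rcases List.mem_cons.mp hz with h | h
              · exact absurd (h ▸ hxl) hzl
              · rcases List.mem_cons.mp hz2 with h2 | h2
                · exact absurd ((h2.trans hxeqy.symm) ▸ hxl) hzl
                · exact ⟨z, h, h2, hzl⟩
          · rw [if_neg hl]
            have hxl : x ∉ l := by simpa using hl
            rw [if_pos ⟨x, List.mem_cons_self, hxeqy ▸ List.mem_cons_self, hxl⟩]

theorem link_or_not_eq_alt_some (s1 s2 l : List String) :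
    link_or_not s1 s2 (some l) = link_or_not_alt s1 s2 (some l) := by
  rw [link_or_not_some_eq]
  unfold link_or_not_alt
  simp only
  rw [pvMergeScan_eq l _ _ (PySem.List.sorted_pairwise s1 (fun x => x))
       (PySem.List.sorted_pairwise s2 (fun x => x))]
  congr 1
  simp [PySem.List.mem_sorted]

-- ===== VERDICT (by name: the statement is the Claim_ definition above) =====
theorem link_or_not_spec : Claim_equal_link_or_not := by
  intro s1 s2 lt _ hpre
  unfold Spec_link_or_not
  cases lt with
  | none => simp [Pre_link_or_not] at hpre
  | some l => exact link_or_not_eq_alt_some s1 s2 l
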